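-- pv_equiv track=rewrite | github.com/lherron2/seed-from-alignment | benchmark_runner/src/ssbench/predict/cacofold_mcmc_pipeline.py | sanitize_rna_sequence
-- ===== SOURCE A (Python) =====
-- def sanitize_rna_sequence(seq: str) -> tuple[str, bool]:
--     """Return (sanitized_seq, changed) with T->U and illegal characters replaced.
--
--     For the under400 benchmark, the only observed non-ACGUT symbols are:
--     - 'X': unknown/modified base; tools generally accept it, so we preserve it
--     - '&': Barnaba fragment separator; external tools reject it, so map to 'N'
--     """
--     seq = seq.strip()
--     out: list[str] = []
--     changed = False
--     for ch in seq.upper():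
--         if ch == "T":
--             out.append("U")
--             changed = True
--             continue
--         if ch in {"A", "C", "G", "U", "X", "N"}:
--             out.append(ch)
--             continue
--         # Keep sequence length stable while ensuring a tool-compatible alphabet.
--         out.append("N")
--         changed = True
--     return "".join(out), changed
-- ===== SOURCE B (Python) =====
-- class _SanitizeTable(dict):
--     """Translation table: default every unmapped code point to 'N'."""
--     def __missing__(self, key):
--         return ord("N")
--
-- _TABLE = _SanitizeTable({ord(c): ord(c) for c in "ACGUXN"})
-- _TABLE[ord("T")] = ord("U")
--
-- def sanitize_rna_sequence(seq: str) -> tuple[str, bool]: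
--     upped = seq.strip().upper()
--     sanitized = upped.translate(_TABLE)
--     return sanitized, sanitized != upped
-- ===== Notes on version B (the rewrite author's own statement) =====
-- stated objective: faster
-- what changed: B replaces A's explicit per-character loop (branch chain, list accumulator, running boolean) by a precomputed translation table applied with str.translate (a dict defaulting to 'N'), deriving the changed flag afterwards as sanitized != upped; the table translation runs inside the interpreter's C loop instead of per-character Python bytecode.
import Mathlib
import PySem

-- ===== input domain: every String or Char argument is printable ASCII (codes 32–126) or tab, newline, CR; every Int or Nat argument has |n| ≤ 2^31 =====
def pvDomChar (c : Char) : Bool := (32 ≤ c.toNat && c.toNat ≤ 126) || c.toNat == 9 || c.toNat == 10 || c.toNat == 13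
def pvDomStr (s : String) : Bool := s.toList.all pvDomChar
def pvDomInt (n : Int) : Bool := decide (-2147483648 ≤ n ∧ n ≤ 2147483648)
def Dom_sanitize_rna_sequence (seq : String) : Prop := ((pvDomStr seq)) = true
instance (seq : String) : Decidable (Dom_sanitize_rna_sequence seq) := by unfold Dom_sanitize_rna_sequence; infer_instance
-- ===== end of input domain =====

-- B applies a precomputed translation table (dict defaulting to 'N') via str.translate instead of
-- A's explicit loop with branch chain, list accumulator and running boolean; objective: faster (constant factor).

-- ===== PORT A =====
def sanitize_rna_sequence (seq : String) : String × Bool :=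
  -- seq = seq.strip(); loop over seq.upper() with list accumulator `out` and boolean `changed`
  let s := PySem.Chars.upper (PySem.Chars.strip seq.toList)
  let r := s.foldl (fun (st : List Char × Bool) ch =>
    if ch = 'T' then (st.1 ++ ['U'], true)
    else if ch = 'A' ∨ ch = 'C' ∨ ch = 'G' ∨ ch = 'U' ∨ ch = 'X' ∨ ch = 'N' then
      (st.1 ++ [ch], st.2)
    else (st.1 ++ ['N'], true)) ([], false)
  (String.ofList r.1, r.2)  -- "".join(out)

-- ===== PORT B =====
-- _TABLE: dict comprehension over "ACGUXN" (identity), then _TABLE[ord('T')] = ord('U');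
-- __missing__ returns ord('N'), so translate looks each char up with default 'N'.
def sanTable : PySem.Dict Char Char :=
  (PySem.Dict.ofList (['A', 'C', 'G', 'U', 'X', 'N'].map (fun c => (c, c)))).insert 'T' 'U'

def sanitize_rna_sequence_alt (seq : String) : String × Bool :=
  let upped := PySem.Chars.upper (PySem.Chars.strip seq.toList)
  -- upped.translate(_TABLE): per code point, the table's value, defaulting to 'N'
  let sanitized := upped.map (fun c => sanTable.getD c 'N')
  -- Python's `sanitized != upped` on str is code-point list inequality.
  (String.ofList sanitized, decide (sanitized ≠ upped))

-- ===== PRECONDITION & SPEC =====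
def Spec_sanitize_rna_sequence (seq : String) (out : String × Bool) : Prop := out = sanitize_rna_sequence_alt seq
instance (seq : String) (out : String × Bool) : Decidable (Spec_sanitize_rna_sequence seq out) := by unfold Spec_sanitize_rna_sequence; infer_instance

-- ===== CLAIM (what is proved, stated in full; the proofs are below) =====
def Claim_equal_sanitize_rna_sequence : Prop := ∀ (seq : String), Dom_sanitize_rna_sequence seq → Spec_sanitize_rna_sequence seq (sanitize_rna_sequence seq)

-- ===== LEMMAS AND PROOFS =====

-- The built table, evaluated to its literal entry list.
theorem sanTable_eq : sanTable = PySem.Dict.mk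
    [('A','A'),('C','C'),('G','G'),('U','U'),('X','X'),('N','N'),('T','U')] := by decide

-- The table lookup, characterised as A's branch chain.
theorem sanTable_getD (c : Char) :
    sanTable.getD c 'N'
      = if c = 'T' then 'U'
        else if c = 'A' ∨ c = 'C' ∨ c = 'G' ∨ c = 'U' ∨ c = 'X' ∨ c = 'N' then c
        else 'N' := by
  rw [sanTable_eq]
  by_cases hT : c = 'T'
  · subst hT; decide
  · by_cases hm : c = 'A' ∨ c = 'C' ∨ c = 'G' ∨ c = 'U' ∨ c = 'X' ∨ c = 'N'
    · rw [if_neg hT, if_pos hm]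
      rcases hm with h|h|h|h|h|h <;> subst h <;> decide
    · rw [if_neg hT, if_neg hm]
      push Not at hm
      obtain ⟨hA, hC, hG, hU, hX, hN⟩ := hm
      simp [PySem.Dict.getD, PySem.Dict.get?, Ne.symm hT, Ne.symm hA, Ne.symm hC,
            Ne.symm hG, Ne.symm hU, Ne.symm hX, Ne.symm hN]

-- A's loop accumulates exactly the map of the table lookup, and its flag is the disjunction of
-- per-char change.
theorem sanitize_loop_eq (s : List Char) (acc : List Char) (b : Bool) :
    s.foldl (fun (st : List Char × Bool) ch =>
      if ch = 'T' then (st.1 ++ ['U'], true)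
      else if ch = 'A' ∨ ch = 'C' ∨ ch = 'G' ∨ ch = 'U' ∨ ch = 'X' ∨ ch = 'N' then
        (st.1 ++ [ch], st.2)
      else (st.1 ++ ['N'], true)) (acc, b)
    = (acc ++ s.map (fun c => sanTable.getD c 'N'),
       b || s.any (fun c => decide (sanTable.getD c 'N' ≠ c))) := by
  induction s generalizing acc b with
  | nil => simp
  | cons c t ih =>
    simp only [List.foldl_cons, List.map_cons, List.any_cons]
    rw [sanTable_getD c]
    by_cases hT : c = 'T'
    · subst hT
      rw [if_pos rfl, if_pos rfl, ih]
      simp [sanTable_getD]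
    · rw [if_neg hT, if_neg hT]
      by_cases hm : c = 'A' ∨ c = 'C' ∨ c = 'G' ∨ c = 'U' ∨ c = 'X' ∨ c = 'N'
      · rw [if_pos hm, if_pos hm, ih]
        simp [sanTable_getD]
      · rw [if_neg hm, if_neg hm, ih]
        have hne : 'N' ≠ c := by
          intro h; exact hm (Or.inr (Or.inr (Or.inr (Or.inr (Or.inr h.symm)))))
        simp only [List.append_assoc, List.singleton_append, Prod.mk.injEq, true_and, Bool.true_or]
        symm
        simp only [Bool.or_eq_true, List.any_eq_true, decide_eq_true_eq]
        exact Or.inr (Or.inl hne)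

-- A map differs from the list iff some element is changed.
theorem map_ne_iff_any (f : Char → Char) (s : List Char) :
    decide (s.map f ≠ s) = s.any (fun c => decide (f c ≠ c)) := by
  induction s with
  | nil => simp
  | cons c t ih =>
    by_cases h : f c = c
    · have : decide (List.map f (c :: t) ≠ c :: t) = decide (List.map f t ≠ t) := by simp [h]
      rw [this, ih]; simp [h]
    · simp [h]

-- ===== VERDICT (by name: the statement is the Claim_ definition above) =====
theorem sanitize_rna_sequence_spec : Claim_equal_sanitize_rna_sequence := by
  intro seq _
  unfold Spec_sanitize_rna_sequence sanitize_rna_sequence sanitize_rna_sequence_alt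
  simp only [sanitize_loop_eq, List.nil_append, Bool.false_or, map_ne_iff_any]
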